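-- pv_equiv track=rewrite | github.com/schir2/strandsPuzzleService | generator/generator.py | generate_region_length_combinations
-- ===== SOURCE A (Python) =====
-- from itertools import combinations
--
-- def generate_region_length_combinations(words):
--     # TODO This needs to generate the actual combinations of words
--     total_length = sum(len(word) for word in words)
--     region_length_combinations = set()
--
--     for num_words in range(1, len(words)):
--         for combo in combinations(words, num_words):
--             combo_length = sum(len(word) for word in combo)
--             complementary_length = total_length - combo_length
--             if combo_length > 0 and complementary_length > 0:
--                 region_length_combinations.add((combo_length, complementary_length))
--                 region_length_combinations.add((complementary_length, combo_length))
--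
--     return region_length_combinations
-- ===== SOURCE B (Python) =====
-- def generate_region_length_combinations(words):
--     n = len(words)
--     total = sum(len(word) for word in words)
--     # table[k] = sums of k-element subsets of the current suffix of words,
--     # in itertools.combinations order, for k = 0..n-1 (Pascal-style DP that
--     # shares suffix subset sums instead of re-summing every combination).
--     table = [[0]] + [[] for _ in range(n - 1)]
--     for length in (len(word) for word in reversed(words)):
--         table = [table[0]] + [[length + s for s in prev] + cur
--                               for prev, cur in zip(table, table[1:])]
--     region_length_combinations = set()
--     for k in range(1, n):
--         for s in table[k]:
--             c = total - s
--             if s > 0 and c > 0: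
--                 region_length_combinations.add((s, c))
--                 region_length_combinations.add((c, s))
--     return region_length_combinations
-- ===== Notes on version B (the rewrite author's own statement) =====
-- stated objective: alternative
-- what changed: B replaces the itertools.combinations enumeration with per-combination re-summation by a Pascal-style DP that builds, for each subset size k, the list of k-subset length sums of each suffix by reusing the suffix results, then emits the same (sum, complement) pairs from those sum lists.
import Mathlib
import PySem

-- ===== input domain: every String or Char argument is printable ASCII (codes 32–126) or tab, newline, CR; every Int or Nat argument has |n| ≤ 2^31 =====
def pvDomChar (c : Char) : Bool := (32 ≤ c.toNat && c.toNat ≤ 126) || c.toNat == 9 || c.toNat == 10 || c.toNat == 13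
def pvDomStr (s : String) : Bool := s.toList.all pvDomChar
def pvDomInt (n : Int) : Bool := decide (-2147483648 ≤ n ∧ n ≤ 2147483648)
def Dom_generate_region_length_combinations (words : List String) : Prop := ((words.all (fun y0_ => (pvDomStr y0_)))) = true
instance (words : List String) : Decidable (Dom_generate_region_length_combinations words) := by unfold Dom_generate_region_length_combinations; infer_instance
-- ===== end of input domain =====

-- B replaces the per-size itertools.combinations enumeration (summing every combination) by a
-- Pascal-style suffix DP over subset-length sums; same returned set (objective: alternative).

-- ===== PORT A =====
-- itertools.combinations(words, k), in itertools' lexicographic order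
def pvCombos : List String → Nat → List (List String)
  | _, 0 => [[]]
  | [], _ + 1 => []
  | x :: xs, k + 1 => (pvCombos xs k).map (fun c => x :: c) ++ pvCombos xs (k + 1)

-- sum(len(word) for word in ws)
def pvSumLen (ws : List String) : Int := ws.foldl (fun a w => a + PySem.Str.len w) 0

def generate_region_length_combinations (words : List String) : List (Int × Int) :=
  let total := pvSumLen words
  (PySem.List.pyRange 1 (words.length : Int) 1).foldl (fun acc k =>
    (pvCombos words k.toNat).foldl (fun acc combo =>
      let combo_length := pvSumLen combo
      let complementary_length := total - combo_length
      if 0 < combo_length ∧ 0 < complementary_length then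
        PySem.Set.add (PySem.Set.add acc (combo_length, complementary_length))
          (complementary_length, combo_length)
      else acc) acc)
    PySem.Set.empty

-- ===== PORT B =====
-- one DP step: [table[0]] + [[length+s for s in prev] + cur for prev, cur in zip(table, table[1:])]
def pvStep (L : Int) (tb : List (List Int)) : List (List Int) :=
  match tb with
  | [] => []
  | h :: t => h :: List.zipWith (fun prev cur => prev.map (fun s => L + s) ++ cur) (h :: t) t

def generate_region_length_combinations_alt (words : List String) : List (Int × Int) :=
  let n := words.length
  let total := pvSumLen words
  let init : List (List Int) := [[0]] ++ List.replicate (n - 1) []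
  let table := words.reverse.foldl (fun tb w => pvStep (PySem.Str.len w) tb) init
  (PySem.List.pyRange 1 (n : Int) 1).foldl (fun acc k =>
    (PySem.List.pyGetD table k []).foldl (fun acc s =>
      let c := total - s
      if 0 < s ∧ 0 < c then
        PySem.Set.add (PySem.Set.add acc (s, c)) (c, s)
      else acc) acc)
    PySem.Set.empty

-- ===== PRECONDITION & SPEC =====
def Spec_generate_region_length_combinations (words : List String) (out : List (Int × Int)) : Prop := out = generate_region_length_combinations_alt words
instance (words : List String) (out : List (Int × Int)) : Decidable (Spec_generate_region_length_combinations words out) := by unfold Spec_generate_region_length_combinations; infer_instance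

-- ===== CLAIM (what is proved, stated in full; the proofs are below) =====
def Claim_equal_generate_region_length_combinations : Prop := ∀ (words : List String), Dom_generate_region_length_combinations words → Spec_generate_region_length_combinations words (generate_region_length_combinations words)

-- ===== LEMMAS AND PROOFS =====

-- lex-ordered k-subset length sums of a suffix (the contents of B's table columns)
def pvSums : List Int → Nat → List Int
  | _, 0 => [0]
  | [], _ + 1 => []
  | L :: ls, k + 1 => (pvSums ls k).map (fun s => L + s) ++ pvSums ls (k + 1)

theorem pvSumLen_cons (x : String) (c : List String) :
    pvSumLen (x :: c) = PySem.Str.len x + pvSumLen c := by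
  unfold pvSumLen
  rw [List.foldl_cons, PySem.List.foldl_add, PySem.List.foldl_add]
  ring

theorem combos_map_sum (xs : List String) (k : Nat) :
    (pvCombos xs k).map pvSumLen = pvSums (xs.map PySem.Str.len) k := by
  induction xs generalizing k with
  | nil => cases k <;> simp [pvCombos, pvSums, pvSumLen]
  | cons x xs ih =>
    cases k with
    | zero => simp [pvCombos, pvSums, pvSumLen]
    | succ k =>
      simp only [pvCombos, List.map_append, List.map_map, ih]
      congr 1
      rw [← ih k, List.map_map]
      congr 1
      funext c
      simp [pvSumLen_cons]

theorem step_cols (L : Int) (ls : List Int) (M : Nat) :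
    pvStep L ((List.range M).map (pvSums ls)) = (List.range M).map (pvSums (L :: ls)) := by
  cases M with
  | zero => rfl
  | succ m =>
    rw [List.range_succ_eq_map]
    simp only [List.map_cons, List.map_map, pvStep]
    apply List.ext_getElem
    · simp
    · intro i h1 h2
      rcases i with _ | i
      · simp [pvSums]
      · simp only [List.getElem_cons_succ]
        have hlen : i < m := by
          simpa using (by simpa using h2 : i + 1 < m + 1)
        rw [List.getElem_zipWith]
        rcases i with _ | j
        · simp [pvSums]
        · simp only [List.getElem_cons_succ, List.getElem_map, List.getElem_range,
            Function.comp]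
          simp [pvSums]

theorem foldr_table (ws : List String) (M : Nat) :
    ws.foldr (fun w tb => pvStep (PySem.Str.len w) tb) ((List.range M).map (pvSums [])) =
      (List.range M).map (pvSums (ws.map PySem.Str.len)) := by
  induction ws with
  | nil => rfl
  | cons w ws ih => simp only [List.foldr_cons, ih, List.map_cons, step_cols]

theorem init_eq_cols (M : Nat) :
    ([[0]] ++ List.replicate M []) = (List.range (M + 1)).map (pvSums ([] : List Int)) := by
  rw [List.range_succ_eq_map, List.map_cons, List.map_map]
  rw [show ((pvSums ([] : List Int)) ∘ Nat.succ) = fun _ => ([] : List Int) from by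
      funext j; simp [Function.comp, pvSums]]
  simp [pvSums, List.map_const']

-- ===== VERDICT (by name: the statement is the Claim_ definition above) =====
theorem generate_region_length_combinations_spec : Claim_equal_generate_region_length_combinations := by
  intro words _
  show generate_region_length_combinations words = generate_region_length_combinations_alt words
  unfold generate_region_length_combinations generate_region_length_combinations_alt
  cases words with
  | nil => rfl
  | cons w ws =>
    set words := w :: ws with hw
    have hn : words.length - 1 + 1 = words.length := by simp [hw]
    have htable : words.reverse.foldl (fun tb w => pvStep (PySem.Str.len w) tb)
        ([[0]] ++ List.replicate (words.length - 1) []) =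
        (List.range words.length).map (pvSums (words.map PySem.Str.len)) := by
      rw [List.foldl_reverse, init_eq_cols, hn]
      exact foldr_table _ _
    simp only [htable]
    apply PySem.List.foldl_congr_mem
    intro acc k hk
    have hkb : 1 ≤ k ∧ k < (words.length : Int) := (PySem.List.mem_pyRange_one).1 hk
    have hk0 : 0 ≤ k := le_trans (by norm_num) hkb.1
    have hklt : k.toNat < words.length := by omega
    have hget : PySem.List.pyGetD ((List.range words.length).map (pvSums (words.map PySem.Str.len))) k [] =
        pvSums (words.map PySem.Str.len) k.toNat := by
      rw [PySem.List.pyGetD_eq_getElem _ _ hk0 (by simpa using hkb.2)]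
      simp
    rw [hget, ← combos_map_sum, List.foldl_map]
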